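-- pv_equiv track=rewrite | github.com/SeshagiriVaidya/multi-agent-deep-research | agents/retriever.py | _parse_web_results
-- ===== SOURCE A (Python) =====
-- from typing import Dict, List, Any
--
-- def _parse_web_results(results: str, max_results: int) -> List[Dict[str, str]]:
--     """Parse web search results into structured format."""
--     parsed = []
--     if not results:
--         return parsed
--
--     # DuckDuckGo returns a string, split by lines
--     lines = results.split('\n')[:max_results * 2]  # Get more lines to parse
--
--     current_entry = {}
--     for line in lines:
--         line = line.strip()
--         if not line:
--             if current_entry:
--                 parsed.append(current_entry)
--                 current_entry = {}
--             continue
--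
--         # Try to extract title and snippet
--         if 'http' in line or 'www.' in line:
--             current_entry['url'] = line
--         elif not current_entry.get('title'):
--             current_entry['title'] = line
--         else:
--             current_entry['snippet'] = line
--
--         if len(parsed) >= max_results:
--             break
--
--     if current_entry and len(parsed) < max_results:
--         parsed.append(current_entry)
--
--     return parsed
-- ===== SOURCE B (Python) =====
-- def _parse_web_results(results, max_results):
--     """Parse web search results into structured format (two-phase: group lines into blocks, then build entries)."""
--     if not results:
--         return []
--     lines = results.split('\n')[:max_results * 2]
--     # Phase 1: group stripped lines into blank-separated non-empty blocks.
--     blocks = []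
--     current = []
--     for raw in lines:
--         s = raw.strip()
--         if s:
--             current.append(s)
--         elif current:
--             blocks.append(current)
--             current = []
--     if current:
--         blocks.append(current)
--     # Phase 2: build one entry per block, stopping at max_results.
--     parsed = []
--     for block in blocks:
--         if len(parsed) >= max_results:
--             break
--         entry = {}
--         for s in block:
--             if 'http' in s or 'www.' in s:
--                 entry['url'] = s
--             elif not entry.get('title'):
--                 entry['title'] = s
--             else:
--                 entry['snippet'] = s
--         parsed.append(entry)
--     return parsed
-- ===== Notes on version B (the rewrite author's own statement) =====
-- stated objective: alternative
-- what changed: Replaced A's fused single pass with interleaved flush/break bookkeeping by a two-phase pipeline: first group the sliced, stripped lines into blank-separated blocks, then build one entry per block and cut the list at max_results.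
import Mathlib
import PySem

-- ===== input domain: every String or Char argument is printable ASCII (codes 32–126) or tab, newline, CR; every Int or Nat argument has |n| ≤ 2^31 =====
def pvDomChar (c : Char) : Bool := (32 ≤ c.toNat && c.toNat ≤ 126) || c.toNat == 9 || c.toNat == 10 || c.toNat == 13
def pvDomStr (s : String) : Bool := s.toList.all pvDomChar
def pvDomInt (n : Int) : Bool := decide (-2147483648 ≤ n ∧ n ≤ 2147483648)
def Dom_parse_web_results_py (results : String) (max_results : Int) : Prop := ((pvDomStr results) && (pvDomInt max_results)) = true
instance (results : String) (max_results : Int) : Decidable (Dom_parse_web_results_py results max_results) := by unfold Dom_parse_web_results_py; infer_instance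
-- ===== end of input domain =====

-- B replaces A's fused single pass (interleaved flush/break bookkeeping) by a two-phase pipeline:
-- group the sliced stripped lines into blank-separated blocks, then build one entry per block up to max_results.


-- ===== PORT A =====
-- the classification of one non-blank stripped line into the current entry (A's if/elif/else)
def pvClassifyA (d : PySem.Dict String String) (line : String) : PySem.Dict String String :=
  if PySem.Str.isIn "http" line || PySem.Str.isIn "www." line then d.insert "url" line
  else if d.getD "title" "" = "" then d.insert "title" line
  else d.insert "snippet" line

-- A's for-loop over the lines; break returns through the same post-loop flush check as loop exit
def pvLoopA (max_results : Int) :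
    List String → List (PySem.Dict String String) → PySem.Dict String String → List (PySem.Dict String String)
  | [], parsed, cur =>
      if cur.items ≠ [] ∧ (parsed.length : Int) < max_results then parsed ++ [cur] else parsed
  | l :: rest, parsed, cur =>
      let line := PySem.Str.strip l
      if line = "" then
        if cur.items ≠ [] then pvLoopA max_results rest (parsed ++ [cur]) PySem.Dict.empty
        else pvLoopA max_results rest parsed cur
      else
        let cur' := pvClassifyA cur line
        if (parsed.length : Int) ≥ max_results then
          if cur'.items ≠ [] ∧ (parsed.length : Int) < max_results then parsed ++ [cur'] else parsed
        else pvLoopA max_results rest parsed cur'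

def parse_web_results_py (results : String) (max_results : Int) : List (List (String × String)) :=
  if results = "" then []
  else
    let lines := PySem.List.slice ((PySem.Str.split? results "\n").getD []) none (some (max_results * 2))
    (pvLoopA max_results lines [] PySem.Dict.empty).map (·.items)

-- ===== PORT B =====
-- B's inner classification of one block line (same rule as the Python B's inner loop body)
def pvClassifyB (e : PySem.Dict String String) (s : String) : PySem.Dict String String :=
  if PySem.Str.isIn "http" s || PySem.Str.isIn "www." s then e.insert "url" s
  else if e.getD "title" "" = "" then e.insert "title" s
  else e.insert "snippet" s

-- Phase 1: group stripped lines into blank-separated non-empty blocks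
def pvGroupB : List String → List (List String) → List String → List (List String)
  | [], blocks, current => if current ≠ [] then blocks ++ [current] else blocks
  | raw :: rest, blocks, current =>
      let s := PySem.Str.strip raw
      if s ≠ "" then pvGroupB rest blocks (current ++ [s])
      else if current ≠ [] then pvGroupB rest (blocks ++ [current]) []
      else pvGroupB rest blocks []

def pvEntryB (block : List String) : PySem.Dict String String :=
  block.foldl pvClassifyB PySem.Dict.empty

-- Phase 2: one entry per block, stopping at max_results
def pvTakeB (max_results : Int) : List (List String) → List (PySem.Dict String String) → List (PySem.Dict String String)
  | [], parsed => parsed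
  | block :: rest, parsed =>
      if (parsed.length : Int) ≥ max_results then parsed
      else pvTakeB max_results rest (parsed ++ [pvEntryB block])

def parse_web_results_py_alt (results : String) (max_results : Int) : List (List (String × String)) :=
  if results = "" then []
  else
    let lines := PySem.List.slice ((PySem.Str.split? results "\n").getD []) none (some (max_results * 2))
    (pvTakeB max_results (pvGroupB lines [] []) []).map (·.items)

-- ===== PRECONDITION & SPEC =====
def Spec_parse_web_results_py (results : String) (max_results : Int) (out : List (List (String × String))) : Prop := out = parse_web_results_py_alt results max_results
instance (results : String) (max_results : Int) (out : List (List (String × String))) : Decidable (Spec_parse_web_results_py results max_results out) := by unfold Spec_parse_web_results_py; infer_instance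

-- ===== CLAIM (what is proved, stated in full; the proofs are below) =====
def Claim_equal_parse_web_results_py : Prop := ∀ (results : String) (max_results : Int), Dom_parse_web_results_py results max_results → Spec_parse_web_results_py results max_results (parse_web_results_py results max_results)

-- ===== LEMMAS AND PROOFS =====

theorem pvInsert_items_ne (d : PySem.Dict String String) (k v : String) :
    (d.insert k v).items ≠ [] := by
  rw [PySem.Dict.items_insert]
  split
  · rename_i h
    intro hnil
    simp at hnil
    simp [PySem.Dict.contains, hnil] at h
  · simp

theorem pvClassify_eq (d : PySem.Dict String String) (s : String) : pvClassifyA d s = pvClassifyB d s := rfl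

theorem pvClassifyB_items_ne (d : PySem.Dict String String) (s : String) :
    (pvClassifyB d s).items ≠ [] := by
  unfold pvClassifyB
  split_ifs <;> exact pvInsert_items_ne _ _ _

theorem pvFoldlClassifyB_items_ne (block : List String) (d : PySem.Dict String String)
    (h : d.items ≠ []) : (block.foldl pvClassifyB d).items ≠ [] := by
  induction block generalizing d with
  | nil => exact h
  | cons x xs ih => exact ih _ (pvClassifyB_items_ne d x)

theorem pvEntryB_items_ne (block : List String) (h : block ≠ []) :
    (pvEntryB block).items ≠ [] := by
  cases block with
  | nil => exact absurd rfl h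
  | cons x xs =>
    show ((x :: xs).foldl pvClassifyB PySem.Dict.empty).items ≠ []
    rw [List.foldl_cons]
    exact pvFoldlClassifyB_items_ne xs _ (pvClassifyB_items_ne _ x)

theorem pvEntryB_append (block : List String) (s : String) :
    pvEntryB (block ++ [s]) = pvClassifyB (pvEntryB block) s := by
  unfold pvEntryB
  rw [List.foldl_append, List.foldl_cons, List.foldl_nil]

theorem pvGroupB_acc (lines : List String) (blocks : List (List String)) (current : List String) :
    pvGroupB lines blocks current = blocks ++ pvGroupB lines [] current := by
  induction lines generalizing blocks current with
  | nil =>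
    unfold pvGroupB
    split_ifs <;> simp
  | cons l rest ih =>
    unfold pvGroupB
    by_cases hs : PySem.Str.strip l = ""
    · simp only [hs, ne_eq, not_true_eq_false, if_false, ite_not]
      by_cases hc : current = []
      · simp only [hc, if_true]
        exact ih blocks []
      · simp only [hc, if_false]
        rw [ih (blocks ++ [current]) [], ih ([] ++ [current]) []]
        simp
    · simp only [ne_eq, hs, not_false_eq_true, if_true]
      exact ih blocks (current ++ [PySem.Str.strip l])

theorem pvTakeB_of_ge (max_results : Int) (blocks : List (List String))
    (parsed : List (PySem.Dict String String)) (h : (parsed.length : Int) ≥ max_results) :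
    pvTakeB max_results blocks parsed = parsed := by
  cases blocks with
  | nil => rfl
  | cons b rest => unfold pvTakeB; simp [h]

theorem pvTakeB_cons_lt (max_results : Int) (block : List String) (rest : List (List String))
    (parsed : List (PySem.Dict String String)) (h : (parsed.length : Int) < max_results) :
    pvTakeB max_results (block :: rest) parsed = pvTakeB max_results rest (parsed ++ [pvEntryB block]) := by
  unfold pvTakeB
  rw [if_neg (by omega)]
  cases rest <;> rfl

theorem pvMain (max_results : Int) (lines : List String)
    (parsed : List (PySem.Dict String String)) (curL : List String)
    (hinv : curL = [] ∨ (parsed.length : Int) < max_results) :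
    pvLoopA max_results lines parsed (pvEntryB curL) =
      pvTakeB max_results (pvGroupB lines [] curL) parsed := by
  induction lines generalizing parsed curL with
  | nil =>
    unfold pvLoopA pvGroupB
    by_cases hc : curL = []
    · have hemp : (pvEntryB curL).items = [] := by rw [hc]; rfl
      simp only [hc, if_true, ite_not]
      rfl
    · have hne := pvEntryB_items_ne curL hc
      have hlt : (parsed.length : Int) < max_results := hinv.resolve_left hc
      rw [if_pos ⟨hne, hlt⟩, if_pos hc]
      simp only [List.nil_append]
      rw [pvTakeB_cons_lt _ _ _ _ hlt]
      rfl
  | cons l rest ih =>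
    unfold pvLoopA pvGroupB
    by_cases hs : PySem.Str.strip l = ""
    · simp only [hs, if_true, ne_eq, not_true_eq_false, if_false, ite_not]
      by_cases hc : curL = []
      · have hemp : (pvEntryB curL).items = [] := by rw [hc]; rfl
        simp only [if_true, hc]
        exact ih parsed [] (Or.inl rfl)
      · have hne := pvEntryB_items_ne curL hc
        have hlt : (parsed.length : Int) < max_results := hinv.resolve_left hc
        simp only [hne, if_false, hc]
        rw [pvGroupB_acc rest ([] ++ [curL]) []]
        show pvLoopA max_results rest (parsed ++ [pvEntryB curL]) (pvEntryB []) = _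
        rw [ih (parsed ++ [pvEntryB curL]) [] (Or.inl rfl)]
        simp only [List.nil_append, List.singleton_append]
        rw [pvTakeB_cons_lt _ _ _ _ hlt]
    · simp only [hs, if_false, ne_eq, not_false_eq_true, if_true]
      rw [pvClassify_eq, ← pvEntryB_append]
      by_cases hge : (parsed.length : Int) ≥ max_results
      · rw [if_pos hge, if_neg (fun h => absurd h.2 (not_lt.mpr hge)),
          pvTakeB_of_ge _ _ _ hge]
      · rw [if_neg hge]
        exact ih parsed (curL ++ [PySem.Str.strip l]) (Or.inr (lt_of_not_ge hge))

-- ===== VERDICT (by name: the statement is the Claim_ definition above) =====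
theorem parse_web_results_py_spec : Claim_equal_parse_web_results_py := by
  intro results max_results _
  unfold Spec_parse_web_results_py parse_web_results_py parse_web_results_py_alt
  by_cases h : results = "" <;> simp [h]
  exact congrArg _ (pvMain max_results _ [] [] (Or.inl rfl))
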